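-- pv_equiv track=rewrite | github.com/mukul975/TSAF-Implemention | src/tsaf/protocols/fipa_parser.py | _parse_fipa_parameters
-- ===== SOURCE A (Python) =====
-- from typing import Dict, List, Any, Optional, Set, Tuple
--
-- def _parse_fipa_parameters(tokens: List[str]) -> Dict[str, Any]:
--     """Parse FIPA parameter tokens."""
--     params = {}
--     i = 0
--
--     while i < len(tokens):
--         if tokens[i].startswith(':'):
--             param_name = tokens[i][1:]  # Remove ':'
--             if i + 1 < len(tokens):
--                 param_value = tokens[i + 1]
--                 # Remove quotes if present
--                 if param_value.startswith('"') and param_value.endswith('"'):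
--                     param_value = param_value[1:-1]
--                 params[param_name] = param_value
--                 i += 2
--             else:
--                 i += 1
--         else:
--             i += 1
--
--     return params
-- ===== SOURCE B (Python) =====
-- from typing import Dict, List, Any, Tuple, Optional
--
-- def _collect_raw_pairs(tokens: List[str]) -> List[Tuple[str, str]]:
--     """State machine over tokens: a pending parameter name captures the next token."""
--     pairs: List[Tuple[str, str]] = []
--     pending: Optional[str] = None
--     for t in tokens:
--         if pending is not None:
--             pairs.append((pending, t))
--             pending = None
--         elif t.startswith(':'):
--             pending = t[1:]
--     return pairs  # a trailing pending name without a value contributes nothing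
--
-- def _unquote(value: str) -> str:
--     if value.startswith('"') and value.endswith('"'):
--         return value[1:-1]
--     return value
--
-- def _parse_fipa_parameters(tokens: List[str]) -> Dict[str, Any]:
--     """Parse FIPA parameter tokens (staged: collect raw pairs, then build dict)."""
--     return {name: _unquote(value) for name, value in _collect_raw_pairs(tokens)}
-- ===== Notes on version B (the rewrite author's own statement) =====
-- stated objective: alternative
-- what changed: Replaces A's index-driven while loop (i+=2/i+=1 bookkeeping with in-loop dict writes) with a staged pipeline: a pending-key state machine first collects the raw (name, value) pairs into a list, and a dict comprehension then unquotes values and builds the result.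
import Mathlib
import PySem

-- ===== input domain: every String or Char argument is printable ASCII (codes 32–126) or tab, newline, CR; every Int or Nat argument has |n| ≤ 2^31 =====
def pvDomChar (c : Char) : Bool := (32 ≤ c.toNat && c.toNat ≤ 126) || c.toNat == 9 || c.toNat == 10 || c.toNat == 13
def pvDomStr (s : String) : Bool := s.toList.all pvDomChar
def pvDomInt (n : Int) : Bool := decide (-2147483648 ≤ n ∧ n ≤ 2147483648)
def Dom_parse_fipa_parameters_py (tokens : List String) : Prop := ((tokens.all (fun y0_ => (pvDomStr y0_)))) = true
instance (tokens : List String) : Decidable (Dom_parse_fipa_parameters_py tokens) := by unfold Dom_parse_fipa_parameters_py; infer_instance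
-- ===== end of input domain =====

-- B restructures A's single index-driven while loop into a staged pipeline
-- (recursive pair collection, then a dict-building pass); same return value, proved below.

-- ===== PORT A =====
-- literal transliteration of A's index-based while loop (i += 2 / i += 1 bookkeeping)
def pvALoop (tokens : List String) (i : Nat) (params : PySem.Dict String String) :
    PySem.Dict String String :=
  if h : i < tokens.length then
    if PySem.Str.startswith tokens[i]! ":" then
      let param_name := PySem.Str.slice tokens[i]! (some 1) none   -- tokens[i][1:]
      if h2 : i + 1 < tokens.length then
        let param_value := tokens[i + 1]!
        let param_value :=
          if PySem.Str.startswith param_value "\"" && PySem.Str.endswith param_value "\"" then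
            PySem.Str.slice param_value (some 1) (some (-1))        -- param_value[1:-1]
          else param_value
        pvALoop tokens (i + 2) (params.insert param_name param_value)
      else pvALoop tokens (i + 1) params
    else pvALoop tokens (i + 1) params
  else params
termination_by tokens.length - i

def parse_fipa_parameters_py (tokens : List String) : List (String × String) :=
  (pvALoop tokens 0 PySem.Dict.empty).items

-- ===== PORT B =====
-- Source B's _collect_raw_pairs loop body: pending-key state machine step
def pvStep (st : Option String × List (String × String)) (t : String) :
    Option String × List (String × String) :=
  match st with
  | (some pending, pairs) => (none, pairs ++ [(pending, t)])
  | (none, pairs) =>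
      if PySem.Str.startswith t ":" then (some (PySem.Str.slice t (some 1) none), pairs)
      else (none, pairs)

-- Source B's _collect_raw_pairs: fold the state machine; a trailing pending name is dropped
def pvCollectRaw (tokens : List String) : List (String × String) :=
  (tokens.foldl pvStep (none, [])).2

-- Source B's _unquote
def pvUnquote (v : String) : String :=
  if PySem.Str.startswith v "\"" && PySem.Str.endswith v "\"" then
    PySem.Str.slice v (some 1) (some (-1))
  else v

-- the dict comprehension over the collected pairs
def parse_fipa_parameters_py_alt (tokens : List String) : List (String × String) :=
  ((pvCollectRaw tokens).foldl
    (fun d kv => d.insert kv.1 (pvUnquote kv.2)) PySem.Dict.empty).items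

-- ===== PRECONDITION & SPEC =====
def Spec_parse_fipa_parameters_py (tokens : List String) (out : List (String × String)) : Prop := out = parse_fipa_parameters_py_alt tokens
instance (tokens : List String) (out : List (String × String)) : Decidable (Spec_parse_fipa_parameters_py tokens out) := by unfold Spec_parse_fipa_parameters_py; infer_instance

-- ===== CLAIM (what is proved, stated in full; the proofs are below) =====
def Claim_equal_parse_fipa_parameters_py : Prop := ∀ (tokens : List String), Dom_parse_fipa_parameters_py tokens → Spec_parse_fipa_parameters_py tokens (parse_fipa_parameters_py tokens)

-- ===== LEMMAS AND PROOFS =====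

-- proof helper: recursive characterisation of the collected pairs
def pvPairs : List String → List (String × String)
  | [] => []
  | head :: rest =>
    if PySem.Str.startswith head ":" then
      match rest with
      | [] => []
      | v :: rest' => (PySem.Str.slice head (some 1) none, v) :: pvPairs rest'
    else pvPairs rest

-- the state-machine fold computes pvPairs
theorem pvFold_eq_pvPairs (l : List String) :
    ∀ ps, (l.foldl pvStep (none, ps)).2 = ps ++ pvPairs l := by
  fun_induction pvPairs l with
  | case1 => intro ps; simp
  | case2 head hs =>
      intro ps
      simp only [List.foldl_cons, List.foldl_nil, pvStep]
      rw [if_pos hs]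
      simp
  | case3 head hs v rest' ih =>
      intro ps
      simp only [List.foldl_cons, pvStep]
      rw [if_pos hs]
      simp only [ih]
      simp
  | case4 head rest hs ih =>
      intro ps
      simp only [List.foldl_cons, pvStep]
      rw [if_neg hs]
      rw [ih]

-- A's loop from index i equals folding the inserts over pvPairs of the suffix.
theorem pvALoop_eq_fold (tokens : List String) (i : Nat) (params : PySem.Dict String String) :
    pvALoop tokens i params =
      (pvPairs (tokens.drop i)).foldl
        (fun d kv => d.insert kv.1 (pvUnquote kv.2)) params := by
  fun_induction pvALoop tokens i params with
  | case1 i params h hs pn h2 pv0 pv ih =>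
      have e2 : i + 1 + 1 = i + 2 := by omega
      rw [List.drop_eq_getElem_cons h, List.drop_eq_getElem_cons h2, e2, ih]
      have hg : tokens[i]! = tokens[i] := getElem!_pos tokens i h
      have hg2 : tokens[i + 1]! = tokens[i + 1] := getElem!_pos tokens (i + 1) h2
      conv_rhs => rw [pvPairs]
      rw [← hg, if_pos hs]
      simp [pn, pv, pv0, pvUnquote, hg, hg2]
  | case2 i params h hs h2 ih =>
      rw [List.drop_eq_getElem_cons h, ih, List.drop_eq_nil_of_le (by omega : tokens.length ≤ i + 1)]
      have hg : tokens[i]! = tokens[i] := getElem!_pos tokens i h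
      conv_rhs => rw [pvPairs]
      rw [← hg, if_pos hs]
      rfl
  | case3 i params h hs ih =>
      rw [List.drop_eq_getElem_cons h, ih]
      have hg : tokens[i]! = tokens[i] := getElem!_pos tokens i h
      conv_rhs => rw [pvPairs.eq_def]
      simp only [← hg, hs, Bool.false_eq_true, if_false]
  | case4 i params h =>
      rw [List.drop_eq_nil_of_le (by omega)]
      rfl

-- ===== VERDICT (by name: the statement is the Claim_ definition above) =====
theorem parse_fipa_parameters_py_spec : Claim_equal_parse_fipa_parameters_py := by
  intro tokens _
  unfold Spec_parse_fipa_parameters_py parse_fipa_parameters_py parse_fipa_parameters_py_alt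
  rw [pvALoop_eq_fold, List.drop_zero, pvCollectRaw, pvFold_eq_pvPairs, List.nil_append]
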